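-- pv_equiv track=rewrite | github.com/gahjelle/advent_of_code | 2020/19_monster_messages/aoc19.py | satisfies_8_11
-- ===== SOURCE A (Python) =====
-- import itertools
--
-- def satisfies_8_11(rule42, rule31, messages, loop):
--     """Find candidates that satisfies the 0: 8 11 rule
--
--     If loop == True, these will be rules of the form
--
--         42 42 ... 42 31 31 ... 31
--
--     where 42 is repeated at least twice and 31 is repeated at least once.
--     Additionally, there needs to be at least one more 42 than 31.
--
--     However, if loop == False, these rules are just 42 42 31, so we
--     additionally enforce that there are 3 parts to the message.
--     """
--     assert not (rule42 & rule31), "Rules 42 and 31 are assumed to be non-overlapping"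
--
--     rule_lens = {len(v) for v in rule42 | rule31}
--     assert len(rule_lens) == 1, "All 42/31 rules are assumed to have the same length"
--     rule_len = rule_lens.pop()
--
--     count_valid = 0
--     for message in messages:
--         chunks = [message[i : i + rule_len] for i in range(0, len(message), rule_len)]
--         num_chunks = len(chunks)
--         if not loop and num_chunks != 3:
--             continue
--
--         # Number of chunks matching rule 42 at the start of the message
--         num_42 = len(list(itertools.takewhile(lambda c: c in rule42, chunks)))
--
--         # Number of chunks matching rule 31 at the end of the message
--         num_31 = len(list(itertools.takewhile(lambda c: c in rule31, chunks[::-1])))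
--
--         # Check that the message is valid
--         if num_42 > num_31 >= 1 and num_42 + num_31 == num_chunks:
--             count_valid += 1
--
--     return count_valid
-- ===== SOURCE B (Python) =====
-- def satisfies_8_11(rule42, rule31, messages, loop):
--     """Count valid messages with a single-pass two-phase automaton per message.
--
--     Instead of counting a 42-prefix and a 31-suffix separately and comparing
--     their sum with the chunk count, each message is scanned once left to right
--     by a small state machine: it stays in phase 42 while chunks match rule 42,
--     switches irrevocably to phase 31 on the first rule-31 chunk, and dies on
--     any chunk that fits neither the current phase nor rule 31.
--     """
--     assert not (rule42 & rule31), "Rules 42 and 31 are assumed to be non-overlapping"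
--
--     rule_lens = {len(v) for v in rule42 | rule31}
--     assert len(rule_lens) == 1, "All 42/31 rules are assumed to have the same length"
--     rule_len = rule_lens.pop()
--
--     count_valid = 0
--     for message in messages:
--         starts = range(0, len(message), rule_len)
--         if not loop and len(starts) != 3:
--             continue
--
--         num_42 = num_31 = 0
--         in_31 = False
--         dead = False
--         for i in starts:
--             chunk = message[i : i + rule_len]
--             if not in_31 and chunk in rule42:
--                 num_42 += 1
--             elif chunk in rule31:
--                 in_31 = True
--                 num_31 += 1
--             else:
--                 dead = True
--                 break
--
--         if not dead and num_42 > num_31 >= 1: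
--             count_valid += 1
--
--     return count_valid
-- ===== Notes on version B (the rewrite author's own statement) =====
-- stated objective: alternative
-- what changed: A makes two takewhile passes (a 42-prefix count and, over the reversed chunk list, a 31-suffix count) and accepts when the counts sum to the chunk count; B scans each message once left-to-right with a two-phase state machine (phase 42, then irrevocably phase 31, dead on a mismatching chunk with early break) and accepts when the scan survives with num_42 > num_31 >= 1 - no reversal, no slicing, no sum comparison.
import Mathlib
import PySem

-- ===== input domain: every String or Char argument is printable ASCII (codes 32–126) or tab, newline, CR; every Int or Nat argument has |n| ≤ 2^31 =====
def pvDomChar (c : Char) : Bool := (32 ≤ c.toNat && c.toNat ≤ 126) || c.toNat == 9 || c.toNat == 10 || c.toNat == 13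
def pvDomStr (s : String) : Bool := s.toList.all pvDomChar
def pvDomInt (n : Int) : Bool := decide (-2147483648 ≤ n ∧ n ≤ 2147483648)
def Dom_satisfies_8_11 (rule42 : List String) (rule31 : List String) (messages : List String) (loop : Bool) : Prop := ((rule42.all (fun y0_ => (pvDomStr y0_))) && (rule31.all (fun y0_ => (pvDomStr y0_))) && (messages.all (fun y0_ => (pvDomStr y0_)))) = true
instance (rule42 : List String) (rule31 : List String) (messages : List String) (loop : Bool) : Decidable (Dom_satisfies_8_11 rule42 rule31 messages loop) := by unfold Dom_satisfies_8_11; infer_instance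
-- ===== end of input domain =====

-- B replaces A's two takewhile scans (42-prefix, reversed 31-suffix) by one
-- left-to-right two-phase state machine per message; objective: alternative.

-- ===== PORT A =====
-- shared chunking code of A:
-- chunks = [message[i : i + rule_len] for i in range(0, len(message), rule_len)]
-- (string slices are ported on .toList; chunks are compared as lists of chars,
-- which agrees with Python's string equality)
def pyChunks (ruleLen : Int) (message : String) : List (List Char) :=
  (PySem.List.pyRange 0 (PySem.Str.len message) ruleLen).map
    (fun i => PySem.List.slice message.toList (some i) (some (i + ruleLen)))

def satisfies_8_11 (rule42 : List String) (rule31 : List String) (messages : List String) (loop : Bool) : Int :=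
  -- rule_len = rule_lens.pop(): under Pre_ the length set is a singleton, so
  -- pop() yields the length of any rule; we take the first of the union.
  let ruleLen : Int := PySem.Str.len ((rule42 ++ rule31).headD "")
  let r42 := rule42.map String.toList
  let r31 := rule31.map String.toList
  messages.foldl (fun count_valid message =>
    let chunks := pyChunks ruleLen message
    let num_chunks := chunks.length
    if !loop && num_chunks != 3 then count_valid
    else
      -- num_42 = len(list(itertools.takewhile(lambda c: c in rule42, chunks)))
      let num_42 := (chunks.takeWhile (fun c => r42.contains c)).length
      -- num_31 = len(list(itertools.takewhile(lambda c: c in rule31, chunks[::-1])))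
      -- (chunks[::-1] is chunks.reverse)
      let num_31 := (chunks.reverse.takeWhile (fun c => r31.contains c)).length
      if num_31 < num_42 ∧ 1 ≤ num_31 ∧ num_42 + num_31 = num_chunks then count_valid + 1
      else count_valid) 0

-- ===== PORT B =====
-- the inner for-loop of Source B: state (num_42, num_31, in_31), early break
-- ('dead = True; break') is the 'none' result
def altScan (r42 r31 : List (List Char)) (ruleLen : Int) (msg : List Char) :
    List Int → Nat → Nat → Bool → Option (Nat × Nat)
  | [], a, b, _ => some (a, b)
  | i :: rest, a, b, in31 =>
    let c := PySem.List.slice msg (some i) (some (i + ruleLen))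
    if !in31 && r42.contains c then altScan r42 r31 ruleLen msg rest (a + 1) b in31
    else if r31.contains c then altScan r42 r31 ruleLen msg rest a (b + 1) true
    else none

def satisfies_8_11_alt (rule42 : List String) (rule31 : List String) (messages : List String) (loop : Bool) : Int :=
  let ruleLen : Int := PySem.Str.len ((rule42 ++ rule31).headD "")
  let r42 := rule42.map String.toList
  let r31 := rule31.map String.toList
  messages.foldl (fun count_valid message =>
    let starts := PySem.List.pyRange 0 (PySem.Str.len message) ruleLen
    if !loop && starts.length != 3 then count_valid
    else
      match altScan r42 r31 ruleLen message.toList starts 0 0 false with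
      | none => count_valid                  -- dead: automaton rejected
      | some (a, b) => if b < a ∧ 1 ≤ b then count_valid + 1 else count_valid) 0

-- ===== PRECONDITION & SPEC =====
-- Pre_ holds exactly where the Python A returns: both asserts pass (disjoint
-- rules, a nonempty union with one common rule length) and range()'s step
-- rule_len is nonzero unless there is no message to chunk (step 0 raises).
def Pre_satisfies_8_11 (rule42 : List String) (rule31 : List String) (messages : List String) (loop : Bool) : Prop :=
  (∀ s ∈ rule42, s ∉ rule31) ∧
  rule42 ++ rule31 ≠ [] ∧
  (∀ s ∈ rule42 ++ rule31, PySem.Str.len s = PySem.Str.len ((rule42 ++ rule31).headD "")) ∧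
  (messages ≠ [] → PySem.Str.len ((rule42 ++ rule31).headD "") ≠ 0)
instance (rule42 : List String) (rule31 : List String) (messages : List String) (loop : Bool) : Decidable (Pre_satisfies_8_11 rule42 rule31 messages loop) := by unfold Pre_satisfies_8_11; infer_instance

def pvWitness_satisfies_8_11 : List String × List String × List String × Bool :=
  (["a"], ["b"], ["aab", "ab", "ba"], true)

def Spec_satisfies_8_11 (rule42 : List String) (rule31 : List String) (messages : List String) (loop : Bool) (out : Int) : Prop := out = satisfies_8_11_alt rule42 rule31 messages loop
instance (rule42 : List String) (rule31 : List String) (messages : List String) (loop : Bool) (out : Int) : Decidable (Spec_satisfies_8_11 rule42 rule31 messages loop out) := by unfold Spec_satisfies_8_11; infer_instance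

-- ===== CLAIM (what is proved, stated in full; the proofs are below) =====
def Claim_equal_satisfies_8_11 : Prop := ∀ (rule42 : List String) (rule31 : List String) (messages : List String) (loop : Bool), Dom_satisfies_8_11 rule42 rule31 messages loop → Pre_satisfies_8_11 rule42 rule31 messages loop → Spec_satisfies_8_11 rule42 rule31 messages loop (satisfies_8_11 rule42 rule31 messages loop)

-- ===== LEMMAS AND PROOFS =====

-- altScan over the index list is the same automaton run over the chunk list
def chunkScan (r42 r31 : List (List Char)) :
    List (List Char) → Nat → Nat → Bool → Option (Nat × Nat)
  | [], a, b, _ => some (a, b)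
  | c :: rest, a, b, in31 =>
    if !in31 && r42.contains c then chunkScan r42 r31 rest (a + 1) b in31
    else if r31.contains c then chunkScan r42 r31 rest a (b + 1) true
    else none

lemma altScan_eq_chunkScan (r42 r31 : List (List Char)) (ruleLen : Int) (msg : List Char)
    (idxs : List Int) (a b : Nat) (in31 : Bool) :
    altScan r42 r31 ruleLen msg idxs a b in31 =
      chunkScan r42 r31 (idxs.map (fun i => PySem.List.slice msg (some i) (some (i + ruleLen)))) a b in31 := by
  induction idxs generalizing a b in31 with
  | nil => rfl
  | cons i rest ih =>
    simp only [altScan, chunkScan, List.map_cons]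
    split_ifs <;> simp [ih]

-- phase 42 consumes any block of rule-42 chunks
lemma chunkScan_prefix (r42 r31 : List (List Char)) (t r : List (List Char))
    (ht : ∀ x ∈ t, r42.contains x = true) (a b : Nat) :
    chunkScan r42 r31 (t ++ r) a b false = chunkScan r42 r31 r (a + t.length) b false := by
  induction t generalizing a with
  | nil => simp
  | cons c rest ih =>
    have hc : r42.contains c = true := ht c (by simp)
    simp only [List.cons_append, chunkScan]
    rw [if_pos (by rw [Bool.not_false, Bool.true_and]; exact hc)]
    have hn : a + (c :: rest).length = (a + 1) + rest.length := by
      simp only [List.length_cons]; omega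
    rw [hn]
    exact ih (fun x hx => ht x (List.mem_cons_of_mem _ hx)) (a + 1)

-- phase 31 accepts an all-31 tail and accumulates its length
lemma chunkScan_all31 (r42 r31 : List (List Char)) (s : List (List Char))
    (hs : ∀ x ∈ s, r31.contains x = true) (a b : Nat) :
    chunkScan r42 r31 s a b true = some (a, b + s.length) := by
  induction s generalizing b with
  | nil => simp [chunkScan]
  | cons c rest ih =>
    have hc : r31.contains c = true := hs c (by simp)
    simp only [chunkScan]
    rw [if_neg (by simp), if_pos hc]
    have hn : b + (c :: rest).length = (b + 1) + rest.length := by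
      simp only [List.length_cons]; omega
    rw [hn]
    exact ih (fun x hx => hs x (List.mem_cons_of_mem _ hx)) (b + 1)

-- phase 31 dies on a tail that is not all rule-31
lemma chunkScan_not_all31 (r42 r31 : List (List Char)) (s : List (List Char))
    (hs : s.all (fun x => r31.contains x) = false) (a b : Nat) :
    chunkScan r42 r31 s a b true = none := by
  induction s generalizing b with
  | nil => simp at hs
  | cons c rest ih =>
    by_cases hc : r31.contains c = true
    · have hrest : rest.all (fun x => r31.contains x) = false := by
        rw [List.all_cons, hc, Bool.true_and] at hs; exact hs
      simp only [chunkScan]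
      rw [if_neg (by simp), if_pos hc]
      exact ih hrest _
    · simp only [chunkScan]
      rw [if_neg (by simp), if_neg hc]

-- the head of dropWhile fails the predicate
lemma dropWhile_head_false {α : Type} (p : α → Bool) (l : List α) (c : α) (rest : List α)
    (h : l.dropWhile p = c :: rest) : p c = false := by
  induction l with
  | nil => simp at h
  | cons x xs ih =>
    by_cases hx : p x = true
    · rw [List.dropWhile_cons_of_pos hx] at h; exact ih h
    · rw [List.dropWhile_cons_of_neg hx] at h
      cases h; simpa using hx

-- the automaton after the 42-phase: started on a chunk list whose head is not
-- a rule-42 chunk, it returns (n, length) iff everything is rule-31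
lemma chunkScan_tail (r42 r31 : List (List Char)) (d : List (List Char)) (n : Nat)
    (hhead : ∀ c rest, d = c :: rest → r42.contains c = false) :
    chunkScan r42 r31 d n 0 false =
      if d.all (fun c => r31.contains c) = true then some (n, d.length) else none := by
  cases d with
  | nil => simp [chunkScan]
  | cons c rest =>
    have hc42 : r42.contains c = false := hhead c rest rfl
    simp only [chunkScan]
    rw [if_neg (by rw [Bool.not_false, Bool.true_and, hc42]; exact Bool.false_ne_true)]
    by_cases hc31 : r31.contains c = true
    · rw [if_pos hc31]
      by_cases hall : rest.all (fun x => r31.contains x) = true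
      · rw [chunkScan_all31 r42 r31 rest (fun x hx => (List.all_eq_true.mp hall) x hx)]
        rw [if_pos (by rw [List.all_cons, hc31, Bool.true_and]; exact hall)]
        simp only [List.length_cons]
        rw [Nat.add_comm]
      · rw [chunkScan_not_all31 r42 r31 rest (by simpa using hall)]
        rw [if_neg (by simp only [List.all_cons, Bool.and_eq_true]; intro h; exact hall h.2)]
    · rw [if_neg hc31]
      rw [if_neg (by simp only [List.all_cons, Bool.and_eq_true]; intro h; exact hc31 h.1)]

-- the acceptance conditions agree on every chunk list, given disjoint rules:
-- A's "prefix count + reversed-suffix count sum to the total" equals the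
-- boundary form "suffix after the 42-prefix is all 31"
lemma cond_eq (q42 q31 : List Char → Bool)
    (hd : ∀ c, q42 c = true → q31 c = false)
    (chunks : List (List Char)) :
    ((chunks.reverse.takeWhile q31).length < (chunks.takeWhile q42).length ∧
      1 ≤ (chunks.reverse.takeWhile q31).length ∧
      (chunks.takeWhile q42).length + (chunks.reverse.takeWhile q31).length = chunks.length)
    ↔ (chunks.length - (chunks.takeWhile q42).length < (chunks.takeWhile q42).length ∧
      1 ≤ chunks.length - (chunks.takeWhile q42).length ∧
      (chunks.drop ((chunks.takeWhile q42).length)).all q31 = true) := by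
  set t := chunks.takeWhile q42 with ht
  set r := chunks.dropWhile q42 with hr
  have hsplit : t ++ r = chunks := List.takeWhile_append_dropWhile
  have ht42 : ∀ x ∈ t, q42 x = true := fun x hx => List.mem_takeWhile_imp hx
  have hlen : chunks.length = t.length + r.length := by
    rw [← hsplit, List.length_append]
  have hdrop : chunks.drop t.length = r := by rw [← hsplit]; exact List.drop_left
  have hrev : chunks.reverse = r.reverse ++ t.reverse := by
    rw [← hsplit, List.reverse_append]
  rw [hdrop, hrev, hlen]
  rcases List.eq_nil_or_concat t with htnil | ⟨u, b, htu⟩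
  · simp only [htnil, List.length_nil]
    constructor <;> rintro ⟨h1, h2, h3⟩ <;> exfalso <;> omega
  · have hb42 : q42 b = true := ht42 b (by simp [htu])
    have hb31 : q31 b = false := hd b hb42
    have htrev : t.reverse = b :: u.reverse := by simp [htu]
    by_cases hall : r.all q31 = true
    · have hall' : ∀ x ∈ r.reverse, q31 x = true := by
        intro x hx; exact (List.all_eq_true.mp hall) x (List.mem_reverse.mp hx)
      rw [List.takeWhile_append_of_pos hall', htrev, List.takeWhile_cons_of_neg (by simp [hb31])]
      simp only [hall, and_true, List.length_append, List.length_reverse,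
        List.length_nil]
      have h1t : 1 ≤ t.length := by rw [htu]; simp
      omega
    · simp only [hall]
      constructor
      · rintro ⟨h1, h2, h3⟩
        exfalso
        have hlenTW : ((r.reverse ++ t.reverse).takeWhile q31).length = r.length := by omega
        have hpref : (r.reverse ++ t.reverse).takeWhile q31 =
            (r.reverse ++ t.reverse).take r.length := by
          have := List.prefix_iff_eq_take.mp (List.takeWhile_prefix q31 (l := r.reverse ++ t.reverse))
          rw [this, hlenTW]
        have htake : (r.reverse ++ t.reverse).take r.length = r.reverse := by
          have := List.take_left (l₁ := r.reverse) (l₂ := t.reverse)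
          simp only [List.length_reverse] at this; exact this
        apply hall
        rw [List.all_eq_true]
        intro x hx
        have : x ∈ (r.reverse ++ t.reverse).takeWhile q31 := by
          rw [hpref, htake]; exact List.mem_reverse.mpr hx
        exact List.mem_takeWhile_imp this
      · rintro ⟨_, _, h3⟩; exact absurd h3 (by simp)

-- disjointness of the rule sets, transported to the char-list level
lemma disj_chars (rule42 rule31 : List String) (h : ∀ s ∈ rule42, s ∉ rule31) :
    ∀ c, (rule42.map String.toList).contains c = true →
      ((rule31.map String.toList).contains c) = false := by
  intro c h42
  by_contra h31
  rw [Bool.not_eq_false] at h31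
  have h42' : c ∈ rule42.map String.toList := by simp_all
  have h31' : c ∈ rule31.map String.toList := by simp_all
  obtain ⟨s, hs, rfl⟩ := List.mem_map.mp h42'
  obtain ⟨t, ht, hts⟩ := List.mem_map.mp h31'
  exact h s hs (String.toList_inj.mp hts ▸ ht)

-- per-message: A's takewhile test and B's automaton make the same decision
lemma body_eq (r42 r31 : List (List Char))
    (hd : ∀ c, r42.contains c = true → r31.contains c = false)
    (chunks : List (List Char)) (cv : Int) :
    (if (chunks.reverse.takeWhile (fun c => r31.contains c)).length <
          (chunks.takeWhile (fun c => r42.contains c)).length ∧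
        1 ≤ (chunks.reverse.takeWhile (fun c => r31.contains c)).length ∧
        (chunks.takeWhile (fun c => r42.contains c)).length +
          (chunks.reverse.takeWhile (fun c => r31.contains c)).length = chunks.length
     then cv + 1 else cv)
    = (match chunkScan r42 r31 chunks 0 0 false with
       | none => cv
       | some (a, b) => if b < a ∧ 1 ≤ b then cv + 1 else cv) := by
  set t := chunks.takeWhile (fun c => r42.contains c) with htdef
  set d := chunks.dropWhile (fun c => r42.contains c) with hddef
  have hsplit : t ++ d = chunks := List.takeWhile_append_dropWhile
  have hlen : chunks.length = t.length + d.length := by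
    rw [← hsplit, List.length_append]
  have hdrop : chunks.drop t.length = d := by rw [← hsplit]; exact List.drop_left
  have hscan : chunkScan r42 r31 chunks 0 0 false = chunkScan r42 r31 d t.length 0 false := by
    conv_lhs => rw [← hsplit]
    rw [chunkScan_prefix r42 r31 t d (fun x hx => List.mem_takeWhile_imp hx)]
    rw [Nat.zero_add]
  have hhead : ∀ c rest, d = c :: rest → r42.contains c = false := by
    intro c rest hc
    exact dropWhile_head_false _ chunks c rest (hddef ▸ hc)
  rw [hscan, chunkScan_tail r42 r31 d t.length hhead]
  rw [if_congr (cond_eq (fun c => r42.contains c) (fun c => r31.contains c) hd chunks) rfl rfl]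
  rw [hdrop, hlen]
  have hcancel : t.length + d.length - t.length = d.length := by omega
  rw [hcancel]
  by_cases hall : d.all (fun c => r31.contains c) = true
  · rw [if_pos hall]
    have hm : (match (some (t.length, d.length) : Option (Nat × Nat)) with
        | none => cv
        | some (a, b) => if b < a ∧ 1 ≤ b then cv + 1 else cv)
        = if d.length < t.length ∧ 1 ≤ d.length then cv + 1 else cv := rfl
    have hiff2 : ((chunks.takeWhile (fun c => r42.contains c)).length > d.length ∧ 1 ≤ d.length ∧
        d.all (fun c => r31.contains c) = true) ↔
        (d.length < (chunks.takeWhile (fun c => r42.contains c)).length ∧ 1 ≤ d.length) := by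
      constructor
      · rintro ⟨h1, h2, -⟩; exact ⟨h1, h2⟩
      · rintro ⟨h1, h2⟩; exact ⟨h1, h2, hall⟩
    rw [hm, if_congr hiff2 rfl rfl]
  · rw [if_neg hall]
    have hm : (match (none : Option (Nat × Nat)) with
        | none => cv
        | some (a, b) => if b < a ∧ 1 ≤ b then cv + 1 else cv) = cv := rfl
    rw [hm, if_neg (fun h => hall h.2.2)]

-- ===== VERDICT (by name: the statement is the Claim_ definition above) =====
theorem satisfies_8_11_spec : Claim_equal_satisfies_8_11 := by
  intro rule42 rule31 messages loop _hdom hpre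
  obtain ⟨hdisj, -, -, -⟩ := hpre
  unfold Spec_satisfies_8_11
  simp only [satisfies_8_11, satisfies_8_11_alt]
  congr 1
  funext count_valid message
  rw [altScan_eq_chunkScan]
  have hchunks : (PySem.List.pyRange 0 (PySem.Str.len message)
        (PySem.Str.len ((rule42 ++ rule31).headD ""))).map
      (fun i => PySem.List.slice message.toList (some i)
        (some (i + PySem.Str.len ((rule42 ++ rule31).headD "")))) =
      pyChunks (PySem.Str.len ((rule42 ++ rule31).headD "")) message := rfl
  rw [hchunks]
  have hlen : (PySem.List.pyRange 0 (PySem.Str.len message)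
        (PySem.Str.len ((rule42 ++ rule31).headD ""))).length =
      (pyChunks (PySem.Str.len ((rule42 ++ rule31).headD "")) message).length := by
    simp [pyChunks]
  rw [hlen]
  by_cases hguard : (!loop &&
      (pyChunks (PySem.Str.len ((rule42 ++ rule31).headD "")) message).length != 3) = true
  · rw [if_pos hguard, if_pos hguard]
  · rw [if_neg hguard, if_neg hguard]
    exact body_eq _ _ (disj_chars rule42 rule31 hdisj) _ count_valid
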